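-- pv_equiv track=rewrite | github.com/AastikRajan/Astro-brain | vedic_engine/data/nakshatra_db.py | yoni_score
-- ===== SOURCE A (Python) =====
-- from typing import Dict, List, NamedTuple, Tuple, Optional
--
-- _YONI_HOSTILE: List[Tuple[str, str]] = [
--     ("Horse", "Buffalo"),
--     ("Elephant", "Lion"),
--     ("Sheep", "Monkey"),
--     ("Serpent", "Mongoose"),  # Mongoose not in list but enemy
--     ("Dog", "Deer"),
--     ("Cat", "Mouse"),
--     ("Tiger", "Deer"),
--     ("Goat", "Tiger"),
-- ]
--
-- _YONI_INIMICAL: List[Tuple[str, str]] = [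
--     ("Horse", "Lion"),
--     ("Elephant", "Buffalo"),
--     ("Sheep", "Dog"),
--     ("Cat", "Monkey"),
-- ]
--
-- _YONI_FRIENDLY: List[Tuple[str, str]] = [
--     ("Horse", "Elephant"),
--     ("Dog", "Lion"),
--     ("Sheep", "Deer"),
--     ("Monkey", "Frog"),
--     ("Cat", "Deer"),
--     ("Goat", "Frog"),
-- ]
--
-- def yoni_score(animal_a: str, animal_b: str) -> int:
--     """
--     Compute Yoni compatibility score (0-4) between two nakshatra animals.
--     Score: same=4, friendly=3, neutral=2, inimical=1, hostile=0
--     """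
--     if animal_a == animal_b:
--         return 4
--     pair = frozenset({animal_a, animal_b})
--     for a, b in _YONI_HOSTILE:
--         if pair == frozenset({a, b}):
--             return 0
--     for a, b in _YONI_INIMICAL:
--         if pair == frozenset({a, b}):
--             return 1
--     for a, b in _YONI_FRIENDLY:
--         if pair == frozenset({a, b}):
--             return 3
--     return 2  # neutral
-- ===== SOURCE B (Python) =====
-- _YONI_HOSTILE = [
--     ("Horse", "Buffalo"),
--     ("Elephant", "Lion"),
--     ("Sheep", "Monkey"),
--     ("Serpent", "Mongoose"),
--     ("Dog", "Deer"),
--     ("Cat", "Mouse"),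
--     ("Tiger", "Deer"),
--     ("Goat", "Tiger"),
-- ]
--
-- _YONI_INIMICAL = [
--     ("Horse", "Lion"),
--     ("Elephant", "Buffalo"),
--     ("Sheep", "Dog"),
--     ("Cat", "Monkey"),
-- ]
--
-- _YONI_FRIENDLY = [
--     ("Horse", "Elephant"),
--     ("Dog", "Lion"),
--     ("Sheep", "Deer"),
--     ("Monkey", "Frog"),
--     ("Cat", "Deer"),
--     ("Goat", "Frog"),
-- ]
--
-- # Integer-encode the 15 animal names once, and compile the relation tables into
-- # one dense symmetric 15x15 score matrix over animal ids (2 = neutral default,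
-- # 4 on the diagonal; friendly=3, inimical=1, hostile=0 written in last-wins
-- # order friendly, inimical, hostile, preserving A's hostile>inimical>friendly
-- # precedence; the tables are in fact disjoint).  A call is then two id lookups
-- # and one matrix cell read -- no pair objects, no table scans.
-- _ANIMALS = ["Horse", "Buffalo", "Elephant", "Lion", "Sheep", "Monkey", "Serpent",
--             "Mongoose", "Dog", "Deer", "Cat", "Mouse", "Tiger", "Goat", "Frog"]
-- _IDX = {name: i for i, name in enumerate(_ANIMALS)}
--
-- _MAT = [[4 if i == j else 2 for j in range(15)] for i in range(15)]
-- for _pairs, _s in ((_YONI_FRIENDLY, 3), (_YONI_INIMICAL, 1), (_YONI_HOSTILE, 0)):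
--     for _x, _y in _pairs:
--         _i, _j = _IDX[_x], _IDX[_y]
--         _MAT[_i][_j] = _s
--         _MAT[_j][_i] = _s
--
-- def yoni_score(animal_a: str, animal_b: str) -> int:
--     if animal_a == animal_b:
--         return 4
--     i = _IDX.get(animal_a)
--     j = _IDX.get(animal_b)
--     if i is None or j is None:
--         return 2  # unknown animal: neutral
--     return _MAT[i][j]
-- ===== Notes on version B (the rewrite author's own statement) =====
-- stated objective: alternative
-- what changed: Replaces A's frozenset-pair scans over three relation lists with an integer encoding of the 15 animal names plus a precompiled dense symmetric 15x15 score matrix, so each call is two id lookups and one matrix cell read instead of building pair sets and scanning tables.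
import Mathlib
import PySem

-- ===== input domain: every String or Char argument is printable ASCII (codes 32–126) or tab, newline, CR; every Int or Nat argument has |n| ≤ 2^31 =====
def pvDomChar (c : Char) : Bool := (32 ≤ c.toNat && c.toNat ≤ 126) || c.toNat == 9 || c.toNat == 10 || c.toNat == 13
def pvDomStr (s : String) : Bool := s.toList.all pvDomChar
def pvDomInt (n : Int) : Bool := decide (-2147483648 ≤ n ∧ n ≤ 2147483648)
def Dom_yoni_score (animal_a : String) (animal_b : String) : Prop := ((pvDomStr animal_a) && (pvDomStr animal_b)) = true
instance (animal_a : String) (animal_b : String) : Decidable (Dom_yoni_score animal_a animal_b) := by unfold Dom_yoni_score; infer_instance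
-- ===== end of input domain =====

-- B integer-encodes the animal names and compiles the three relation tables into one
-- dense symmetric score matrix, so a call is two id lookups and a matrix read instead
-- of A's frozenset-pair scans over three lists (alternative data structure, same cost class).

-- ===== PORT A =====
def yoniHostile : List (String × String) :=
  [("Horse", "Buffalo"), ("Elephant", "Lion"), ("Sheep", "Monkey"), ("Serpent", "Mongoose"),
   ("Dog", "Deer"), ("Cat", "Mouse"), ("Tiger", "Deer"), ("Goat", "Tiger")]

def yoniInimical : List (String × String) :=
  [("Horse", "Lion"), ("Elephant", "Buffalo"), ("Sheep", "Dog"), ("Cat", "Monkey")]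

def yoniFriendly : List (String × String) :=
  [("Horse", "Elephant"), ("Dog", "Lion"), ("Sheep", "Deer"), ("Monkey", "Frog"),
   ("Cat", "Deer"), ("Goat", "Frog")]

-- frozenset({animal_a, animal_b}) == frozenset({x, y}); exact here since A only
-- compares after ruling out animal_a == animal_b and every table entry has x ≠ y.
def pairMatches (a b x y : String) : Bool :=
  (a == x && b == y) || (a == y && b == x)

-- One of A's for-loops: scan the table entry by entry for a pair match (early return).
def scanPair (a b : String) : List (String × String) → Bool
  | [] => false
  | (x, y) :: rest => if pairMatches a b x y then true else scanPair a b rest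

-- Literal port of A: the guard, then the three for-loops with early return.
def yoni_score (animal_a : String) (animal_b : String) : Int :=
  if animal_a = animal_b then 4
  else if scanPair animal_a animal_b yoniHostile then 0
  else if scanPair animal_a animal_b yoniInimical then 1
  else if scanPair animal_a animal_b yoniFriendly then 3
  else 2

-- ===== PORT B =====
def animals : List String :=
  ["Horse", "Buffalo", "Elephant", "Lion", "Sheep", "Monkey", "Serpent",
   "Mongoose", "Dog", "Deer", "Cat", "Mouse", "Tiger", "Goat", "Frog"]

-- _IDX = {name: i for i, name in enumerate(_ANIMALS)}
def idxDict : PySem.Dict String Int :=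
  (PySem.List.enumerate animals).foldl (fun d p => d.insert p.2 p.1) PySem.Dict.empty

-- _MAT[i][j] = v (both indices known in range; pySetD is exact there)
def setCell (m : List (List Int)) (i j : Int) (v : Int) : List (List Int) :=
  PySem.List.pySetD m i (PySem.List.pySetD (PySem.List.pyGetD m i []) j v)

-- the matrix: neutral 2, diagonal 4, then the three tables written in symmetrically
-- (_IDX[x] indexing is exact via getD 0: every table animal is a key of _IDX)
def scoreMat : List (List Int) :=
  [(yoniFriendly, (3 : Int)), (yoniInimical, 1), (yoniHostile, 0)].foldl
    (fun m ts => ts.1.foldl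
      (fun m p =>
        let i := idxDict.getD p.1 0
        let j := idxDict.getD p.2 0
        setCell (setCell m i j ts.2) j i ts.2) m)
    ((List.range 15).map (fun i => (List.range 15).map (fun j => if i = j then 4 else 2)))

def yoni_score_alt (animal_a : String) (animal_b : String) : Int :=
  if animal_a = animal_b then 4
  else
    match idxDict.get? animal_a, idxDict.get? animal_b with
    | some i, some j => PySem.List.pyGetD (PySem.List.pyGetD scoreMat i []) j 2
    | _, _ => 2

-- ===== PRECONDITION & SPEC =====
def Spec_yoni_score (animal_a : String) (animal_b : String) (out : Int) : Prop := out = yoni_score_alt animal_a animal_b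
instance (animal_a : String) (animal_b : String) (out : Int) : Decidable (Spec_yoni_score animal_a animal_b out) := by unfold Spec_yoni_score; infer_instance

-- ===== CLAIM (what is proved, stated in full; the proofs are below) =====
def Claim_equal_yoni_score : Prop := ∀ (animal_a : String) (animal_b : String), Dom_yoni_score animal_a animal_b → Spec_yoni_score animal_a animal_b (yoni_score animal_a animal_b)

-- ===== LEMMAS AND PROOFS =====

-- ===== VERDICT (by name: the statement is the Claim_ definition above) =====
set_option maxHeartbeats 4000000 in
set_option maxRecDepth 40000 in
theorem yoni_score_spec : Claim_equal_yoni_score := by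
  intro a b _
  unfold Spec_yoni_score
  by_cases h0 : a = "Horse"
  · subst h0
    by_cases g0 : b = "Horse"
    · subst g0; decide
    by_cases g1 : b = "Buffalo"
    · subst g1; decide
    by_cases g2 : b = "Elephant"
    · subst g2; decide
    by_cases g3 : b = "Lion"
    · subst g3; decide
    by_cases g4 : b = "Sheep"
    · subst g4; decide
    by_cases g5 : b = "Monkey"
    · subst g5; decide
    by_cases g6 : b = "Serpent"
    · subst g6; decide
    by_cases g7 : b = "Mongoose"
    · subst g7; decide
    by_cases g8 : b = "Dog"
    · subst g8; decide
    by_cases g9 : b = "Deer"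
    · subst g9; decide
    by_cases g10 : b = "Cat"
    · subst g10; decide
    by_cases g11 : b = "Mouse"
    · subst g11; decide
    by_cases g12 : b = "Tiger"
    · subst g12; decide
    by_cases g13 : b = "Goat"
    · subst g13; decide
    by_cases g14 : b = "Frog"
    · subst g14; decide
    simp [yoni_score, yoni_score_alt, scanPair, pairMatches, yoniHostile, yoniInimical, yoniFriendly, idxDict, animals, PySem.List.enumerate, PySem.Dict.get?_insert, PySem.Dict.get?_empty, g0, g1, g2, g3, g4, g5, g6, g7, g8, g9, g10, g11, g12, g13, g14]
  by_cases h1 : a = "Buffalo"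
  · subst h1
    by_cases g0 : b = "Horse"
    · subst g0; decide
    by_cases g1 : b = "Buffalo"
    · subst g1; decide
    by_cases g2 : b = "Elephant"
    · subst g2; decide
    by_cases g3 : b = "Lion"
    · subst g3; decide
    by_cases g4 : b = "Sheep"
    · subst g4; decide
    by_cases g5 : b = "Monkey"
    · subst g5; decide
    by_cases g6 : b = "Serpent"
    · subst g6; decide
    by_cases g7 : b = "Mongoose"
    · subst g7; decide
    by_cases g8 : b = "Dog"
    · subst g8; decide
    by_cases g9 : b = "Deer"
    · subst g9; decide
    by_cases g10 : b = "Cat"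
    · subst g10; decide
    by_cases g11 : b = "Mouse"
    · subst g11; decide
    by_cases g12 : b = "Tiger"
    · subst g12; decide
    by_cases g13 : b = "Goat"
    · subst g13; decide
    by_cases g14 : b = "Frog"
    · subst g14; decide
    simp [yoni_score, yoni_score_alt, scanPair, pairMatches, yoniHostile, yoniInimical, yoniFriendly, idxDict, animals, PySem.List.enumerate, PySem.Dict.get?_insert, PySem.Dict.get?_empty, g0, g1, g2, g3, g4, g5, g6, g7, g8, g9, g10, g11, g12, g13, g14]
  by_cases h2 : a = "Elephant"
  · subst h2
    by_cases g0 : b = "Horse"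
    · subst g0; decide
    by_cases g1 : b = "Buffalo"
    · subst g1; decide
    by_cases g2 : b = "Elephant"
    · subst g2; decide
    by_cases g3 : b = "Lion"
    · subst g3; decide
    by_cases g4 : b = "Sheep"
    · subst g4; decide
    by_cases g5 : b = "Monkey"
    · subst g5; decide
    by_cases g6 : b = "Serpent"
    · subst g6; decide
    by_cases g7 : b = "Mongoose"
    · subst g7; decide
    by_cases g8 : b = "Dog"
    · subst g8; decide
    by_cases g9 : b = "Deer"
    · subst g9; decide
    by_cases g10 : b = "Cat"
    · subst g10; decide
    by_cases g11 : b = "Mouse"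
    · subst g11; decide
    by_cases g12 : b = "Tiger"
    · subst g12; decide
    by_cases g13 : b = "Goat"
    · subst g13; decide
    by_cases g14 : b = "Frog"
    · subst g14; decide
    simp [yoni_score, yoni_score_alt, scanPair, pairMatches, yoniHostile, yoniInimical, yoniFriendly, idxDict, animals, PySem.List.enumerate, PySem.Dict.get?_insert, PySem.Dict.get?_empty, g0, g1, g2, g3, g4, g5, g6, g7, g8, g9, g10, g11, g12, g13, g14]
  by_cases h3 : a = "Lion"
  · subst h3
    by_cases g0 : b = "Horse"
    · subst g0; decide
    by_cases g1 : b = "Buffalo"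
    · subst g1; decide
    by_cases g2 : b = "Elephant"
    · subst g2; decide
    by_cases g3 : b = "Lion"
    · subst g3; decide
    by_cases g4 : b = "Sheep"
    · subst g4; decide
    by_cases g5 : b = "Monkey"
    · subst g5; decide
    by_cases g6 : b = "Serpent"
    · subst g6; decide
    by_cases g7 : b = "Mongoose"
    · subst g7; decide
    by_cases g8 : b = "Dog"
    · subst g8; decide
    by_cases g9 : b = "Deer"
    · subst g9; decide
    by_cases g10 : b = "Cat"
    · subst g10; decide
    by_cases g11 : b = "Mouse"
    · subst g11; decide
    by_cases g12 : b = "Tiger"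
    · subst g12; decide
    by_cases g13 : b = "Goat"
    · subst g13; decide
    by_cases g14 : b = "Frog"
    · subst g14; decide
    simp [yoni_score, yoni_score_alt, scanPair, pairMatches, yoniHostile, yoniInimical, yoniFriendly, idxDict, animals, PySem.List.enumerate, PySem.Dict.get?_insert, PySem.Dict.get?_empty, g0, g1, g2, g3, g4, g5, g6, g7, g8, g9, g10, g11, g12, g13, g14]
  by_cases h4 : a = "Sheep"
  · subst h4
    by_cases g0 : b = "Horse"
    · subst g0; decide
    by_cases g1 : b = "Buffalo"
    · subst g1; decide
    by_cases g2 : b = "Elephant"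
    · subst g2; decide
    by_cases g3 : b = "Lion"
    · subst g3; decide
    by_cases g4 : b = "Sheep"
    · subst g4; decide
    by_cases g5 : b = "Monkey"
    · subst g5; decide
    by_cases g6 : b = "Serpent"
    · subst g6; decide
    by_cases g7 : b = "Mongoose"
    · subst g7; decide
    by_cases g8 : b = "Dog"
    · subst g8; decide
    by_cases g9 : b = "Deer"
    · subst g9; decide
    by_cases g10 : b = "Cat"
    · subst g10; decide
    by_cases g11 : b = "Mouse"
    · subst g11; decide
    by_cases g12 : b = "Tiger"
    · subst g12; decide
    by_cases g13 : b = "Goat"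
    · subst g13; decide
    by_cases g14 : b = "Frog"
    · subst g14; decide
    simp [yoni_score, yoni_score_alt, scanPair, pairMatches, yoniHostile, yoniInimical, yoniFriendly, idxDict, animals, PySem.List.enumerate, PySem.Dict.get?_insert, PySem.Dict.get?_empty, g0, g1, g2, g3, g4, g5, g6, g7, g8, g9, g10, g11, g12, g13, g14]
  by_cases h5 : a = "Monkey"
  · subst h5
    by_cases g0 : b = "Horse"
    · subst g0; decide
    by_cases g1 : b = "Buffalo"
    · subst g1; decide
    by_cases g2 : b = "Elephant"
    · subst g2; decide
    by_cases g3 : b = "Lion"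
    · subst g3; decide
    by_cases g4 : b = "Sheep"
    · subst g4; decide
    by_cases g5 : b = "Monkey"
    · subst g5; decide
    by_cases g6 : b = "Serpent"
    · subst g6; decide
    by_cases g7 : b = "Mongoose"
    · subst g7; decide
    by_cases g8 : b = "Dog"
    · subst g8; decide
    by_cases g9 : b = "Deer"
    · subst g9; decide
    by_cases g10 : b = "Cat"
    · subst g10; decide
    by_cases g11 : b = "Mouse"
    · subst g11; decide
    by_cases g12 : b = "Tiger"
    · subst g12; decide
    by_cases g13 : b = "Goat"
    · subst g13; decide
    by_cases g14 : b = "Frog"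
    · subst g14; decide
    simp [yoni_score, yoni_score_alt, scanPair, pairMatches, yoniHostile, yoniInimical, yoniFriendly, idxDict, animals, PySem.List.enumerate, PySem.Dict.get?_insert, PySem.Dict.get?_empty, g0, g1, g2, g3, g4, g5, g6, g7, g8, g9, g10, g11, g12, g13, g14]
  by_cases h6 : a = "Serpent"
  · subst h6
    by_cases g0 : b = "Horse"
    · subst g0; decide
    by_cases g1 : b = "Buffalo"
    · subst g1; decide
    by_cases g2 : b = "Elephant"
    · subst g2; decide
    by_cases g3 : b = "Lion"
    · subst g3; decide
    by_cases g4 : b = "Sheep"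
    · subst g4; decide
    by_cases g5 : b = "Monkey"
    · subst g5; decide
    by_cases g6 : b = "Serpent"
    · subst g6; decide
    by_cases g7 : b = "Mongoose"
    · subst g7; decide
    by_cases g8 : b = "Dog"
    · subst g8; decide
    by_cases g9 : b = "Deer"
    · subst g9; decide
    by_cases g10 : b = "Cat"
    · subst g10; decide
    by_cases g11 : b = "Mouse"
    · subst g11; decide
    by_cases g12 : b = "Tiger"
    · subst g12; decide
    by_cases g13 : b = "Goat"
    · subst g13; decide
    by_cases g14 : b = "Frog"
    · subst g14; decide
    simp [yoni_score, yoni_score_alt, scanPair, pairMatches, yoniHostile, yoniInimical, yoniFriendly, idxDict, animals, PySem.List.enumerate, PySem.Dict.get?_insert, PySem.Dict.get?_empty, g0, g1, g2, g3, g4, g5, g6, g7, g8, g9, g10, g11, g12, g13, g14]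
  by_cases h7 : a = "Mongoose"
  · subst h7
    by_cases g0 : b = "Horse"
    · subst g0; decide
    by_cases g1 : b = "Buffalo"
    · subst g1; decide
    by_cases g2 : b = "Elephant"
    · subst g2; decide
    by_cases g3 : b = "Lion"
    · subst g3; decide
    by_cases g4 : b = "Sheep"
    · subst g4; decide
    by_cases g5 : b = "Monkey"
    · subst g5; decide
    by_cases g6 : b = "Serpent"
    · subst g6; decide
    by_cases g7 : b = "Mongoose"
    · subst g7; decide
    by_cases g8 : b = "Dog"
    · subst g8; decide
    by_cases g9 : b = "Deer"
    · subst g9; decide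
    by_cases g10 : b = "Cat"
    · subst g10; decide
    by_cases g11 : b = "Mouse"
    · subst g11; decide
    by_cases g12 : b = "Tiger"
    · subst g12; decide
    by_cases g13 : b = "Goat"
    · subst g13; decide
    by_cases g14 : b = "Frog"
    · subst g14; decide
    simp [yoni_score, yoni_score_alt, scanPair, pairMatches, yoniHostile, yoniInimical, yoniFriendly, idxDict, animals, PySem.List.enumerate, PySem.Dict.get?_insert, PySem.Dict.get?_empty, g0, g1, g2, g3, g4, g5, g6, g7, g8, g9, g10, g11, g12, g13, g14]
  by_cases h8 : a = "Dog"
  · subst h8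
    by_cases g0 : b = "Horse"
    · subst g0; decide
    by_cases g1 : b = "Buffalo"
    · subst g1; decide
    by_cases g2 : b = "Elephant"
    · subst g2; decide
    by_cases g3 : b = "Lion"
    · subst g3; decide
    by_cases g4 : b = "Sheep"
    · subst g4; decide
    by_cases g5 : b = "Monkey"
    · subst g5; decide
    by_cases g6 : b = "Serpent"
    · subst g6; decide
    by_cases g7 : b = "Mongoose"
    · subst g7; decide
    by_cases g8 : b = "Dog"
    · subst g8; decide
    by_cases g9 : b = "Deer"
    · subst g9; decide
    by_cases g10 : b = "Cat"
    · subst g10; decide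
    by_cases g11 : b = "Mouse"
    · subst g11; decide
    by_cases g12 : b = "Tiger"
    · subst g12; decide
    by_cases g13 : b = "Goat"
    · subst g13; decide
    by_cases g14 : b = "Frog"
    · subst g14; decide
    simp [yoni_score, yoni_score_alt, scanPair, pairMatches, yoniHostile, yoniInimical, yoniFriendly, idxDict, animals, PySem.List.enumerate, PySem.Dict.get?_insert, PySem.Dict.get?_empty, g0, g1, g2, g3, g4, g5, g6, g7, g8, g9, g10, g11, g12, g13, g14]
  by_cases h9 : a = "Deer"
  · subst h9
    by_cases g0 : b = "Horse"
    · subst g0; decide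
    by_cases g1 : b = "Buffalo"
    · subst g1; decide
    by_cases g2 : b = "Elephant"
    · subst g2; decide
    by_cases g3 : b = "Lion"
    · subst g3; decide
    by_cases g4 : b = "Sheep"
    · subst g4; decide
    by_cases g5 : b = "Monkey"
    · subst g5; decide
    by_cases g6 : b = "Serpent"
    · subst g6; decide
    by_cases g7 : b = "Mongoose"
    · subst g7; decide
    by_cases g8 : b = "Dog"
    · subst g8; decide
    by_cases g9 : b = "Deer"
    · subst g9; decide
    by_cases g10 : b = "Cat"
    · subst g10; decide
    by_cases g11 : b = "Mouse"
    · subst g11; decide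
    by_cases g12 : b = "Tiger"
    · subst g12; decide
    by_cases g13 : b = "Goat"
    · subst g13; decide
    by_cases g14 : b = "Frog"
    · subst g14; decide
    simp [yoni_score, yoni_score_alt, scanPair, pairMatches, yoniHostile, yoniInimical, yoniFriendly, idxDict, animals, PySem.List.enumerate, PySem.Dict.get?_insert, PySem.Dict.get?_empty, g0, g1, g2, g3, g4, g5, g6, g7, g8, g9, g10, g11, g12, g13, g14]
  by_cases h10 : a = "Cat"
  · subst h10
    by_cases g0 : b = "Horse"
    · subst g0; decide
    by_cases g1 : b = "Buffalo"
    · subst g1; decide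
    by_cases g2 : b = "Elephant"
    · subst g2; decide
    by_cases g3 : b = "Lion"
    · subst g3; decide
    by_cases g4 : b = "Sheep"
    · subst g4; decide
    by_cases g5 : b = "Monkey"
    · subst g5; decide
    by_cases g6 : b = "Serpent"
    · subst g6; decide
    by_cases g7 : b = "Mongoose"
    · subst g7; decide
    by_cases g8 : b = "Dog"
    · subst g8; decide
    by_cases g9 : b = "Deer"
    · subst g9; decide
    by_cases g10 : b = "Cat"
    · subst g10; decide
    by_cases g11 : b = "Mouse"
    · subst g11; decide
    by_cases g12 : b = "Tiger"
    · subst g12; decide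
    by_cases g13 : b = "Goat"
    · subst g13; decide
    by_cases g14 : b = "Frog"
    · subst g14; decide
    simp [yoni_score, yoni_score_alt, scanPair, pairMatches, yoniHostile, yoniInimical, yoniFriendly, idxDict, animals, PySem.List.enumerate, PySem.Dict.get?_insert, PySem.Dict.get?_empty, g0, g1, g2, g3, g4, g5, g6, g7, g8, g9, g10, g11, g12, g13, g14]
  by_cases h11 : a = "Mouse"
  · subst h11
    by_cases g0 : b = "Horse"
    · subst g0; decide
    by_cases g1 : b = "Buffalo"
    · subst g1; decide
    by_cases g2 : b = "Elephant"
    · subst g2; decide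
    by_cases g3 : b = "Lion"
    · subst g3; decide
    by_cases g4 : b = "Sheep"
    · subst g4; decide
    by_cases g5 : b = "Monkey"
    · subst g5; decide
    by_cases g6 : b = "Serpent"
    · subst g6; decide
    by_cases g7 : b = "Mongoose"
    · subst g7; decide
    by_cases g8 : b = "Dog"
    · subst g8; decide
    by_cases g9 : b = "Deer"
    · subst g9; decide
    by_cases g10 : b = "Cat"
    · subst g10; decide
    by_cases g11 : b = "Mouse"
    · subst g11; decide
    by_cases g12 : b = "Tiger"
    · subst g12; decide
    by_cases g13 : b = "Goat"
    · subst g13; decide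
    by_cases g14 : b = "Frog"
    · subst g14; decide
    simp [yoni_score, yoni_score_alt, scanPair, pairMatches, yoniHostile, yoniInimical, yoniFriendly, idxDict, animals, PySem.List.enumerate, PySem.Dict.get?_insert, PySem.Dict.get?_empty, g0, g1, g2, g3, g4, g5, g6, g7, g8, g9, g10, g11, g12, g13, g14]
  by_cases h12 : a = "Tiger"
  · subst h12
    by_cases g0 : b = "Horse"
    · subst g0; decide
    by_cases g1 : b = "Buffalo"
    · subst g1; decide
    by_cases g2 : b = "Elephant"
    · subst g2; decide
    by_cases g3 : b = "Lion"
    · subst g3; decide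
    by_cases g4 : b = "Sheep"
    · subst g4; decide
    by_cases g5 : b = "Monkey"
    · subst g5; decide
    by_cases g6 : b = "Serpent"
    · subst g6; decide
    by_cases g7 : b = "Mongoose"
    · subst g7; decide
    by_cases g8 : b = "Dog"
    · subst g8; decide
    by_cases g9 : b = "Deer"
    · subst g9; decide
    by_cases g10 : b = "Cat"
    · subst g10; decide
    by_cases g11 : b = "Mouse"
    · subst g11; decide
    by_cases g12 : b = "Tiger"
    · subst g12; decide
    by_cases g13 : b = "Goat"
    · subst g13; decide
    by_cases g14 : b = "Frog"
    · subst g14; decide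
    simp [yoni_score, yoni_score_alt, scanPair, pairMatches, yoniHostile, yoniInimical, yoniFriendly, idxDict, animals, PySem.List.enumerate, PySem.Dict.get?_insert, PySem.Dict.get?_empty, g0, g1, g2, g3, g4, g5, g6, g7, g8, g9, g10, g11, g12, g13, g14]
  by_cases h13 : a = "Goat"
  · subst h13
    by_cases g0 : b = "Horse"
    · subst g0; decide
    by_cases g1 : b = "Buffalo"
    · subst g1; decide
    by_cases g2 : b = "Elephant"
    · subst g2; decide
    by_cases g3 : b = "Lion"
    · subst g3; decide
    by_cases g4 : b = "Sheep"
    · subst g4; decide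
    by_cases g5 : b = "Monkey"
    · subst g5; decide
    by_cases g6 : b = "Serpent"
    · subst g6; decide
    by_cases g7 : b = "Mongoose"
    · subst g7; decide
    by_cases g8 : b = "Dog"
    · subst g8; decide
    by_cases g9 : b = "Deer"
    · subst g9; decide
    by_cases g10 : b = "Cat"
    · subst g10; decide
    by_cases g11 : b = "Mouse"
    · subst g11; decide
    by_cases g12 : b = "Tiger"
    · subst g12; decide
    by_cases g13 : b = "Goat"
    · subst g13; decide
    by_cases g14 : b = "Frog"
    · subst g14; decide
    simp [yoni_score, yoni_score_alt, scanPair, pairMatches, yoniHostile, yoniInimical, yoniFriendly, idxDict, animals, PySem.List.enumerate, PySem.Dict.get?_insert, PySem.Dict.get?_empty, g0, g1, g2, g3, g4, g5, g6, g7, g8, g9, g10, g11, g12, g13, g14]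
  by_cases h14 : a = "Frog"
  · subst h14
    by_cases g0 : b = "Horse"
    · subst g0; decide
    by_cases g1 : b = "Buffalo"
    · subst g1; decide
    by_cases g2 : b = "Elephant"
    · subst g2; decide
    by_cases g3 : b = "Lion"
    · subst g3; decide
    by_cases g4 : b = "Sheep"
    · subst g4; decide
    by_cases g5 : b = "Monkey"
    · subst g5; decide
    by_cases g6 : b = "Serpent"
    · subst g6; decide
    by_cases g7 : b = "Mongoose"
    · subst g7; decide
    by_cases g8 : b = "Dog"
    · subst g8; decide
    by_cases g9 : b = "Deer"
    · subst g9; decide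
    by_cases g10 : b = "Cat"
    · subst g10; decide
    by_cases g11 : b = "Mouse"
    · subst g11; decide
    by_cases g12 : b = "Tiger"
    · subst g12; decide
    by_cases g13 : b = "Goat"
    · subst g13; decide
    by_cases g14 : b = "Frog"
    · subst g14; decide
    simp [yoni_score, yoni_score_alt, scanPair, pairMatches, yoniHostile, yoniInimical, yoniFriendly, idxDict, animals, PySem.List.enumerate, PySem.Dict.get?_insert, PySem.Dict.get?_empty, g0, g1, g2, g3, g4, g5, g6, g7, g8, g9, g10, g11, g12, g13, g14]
  simp [yoni_score, yoni_score_alt, scanPair, pairMatches, yoniHostile, yoniInimical, yoniFriendly, idxDict, animals, PySem.List.enumerate, PySem.Dict.get?_insert, PySem.Dict.get?_empty, h0, h1, h2, h3, h4, h5, h6, h7, h8, h9, h10, h11, h12, h13, h14]
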